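-- pv_equiv track=rewrite | github.com/seanchiuai/bioscreen | frontend/components/charts.py | build_function_overlap
-- ===== SOURCE A (Python) =====
-- def build_function_overlap(
--     function_prediction: dict,
--     top_match: dict,
-- ) -> tuple[list[str], list[str], list[str]] | None:
--     """Return (query_only, shared, match_only) GO term lists.
--
--     Caller renders with ``st.columns`` for a Venn-like display.
--     """
--     if not function_prediction or not top_match:
--         return None
--
--     query_terms = {
--         t.get("term", "") for t in function_prediction.get("go_terms", [])
--     }
--     match_terms = {
--         t.get("term", "") for t in top_match.get("go_terms", [])
--     }
--
--     if not query_terms and not match_terms: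
--         return None
--
--     shared = sorted(query_terms & match_terms)
--     query_only = sorted(query_terms - match_terms)
--     match_only = sorted(match_terms - query_terms)
--
--     if not shared and not query_only and not match_only:
--         return None
--
--     return query_only, shared, match_only
-- ===== SOURCE B (Python) =====
-- def build_function_overlap(
--     function_prediction: dict,
--     top_match: dict,
-- ) -> tuple[list[str], list[str], list[str]] | None:
--     """Single-pass variant: one flag dict (bit 1 = query, bit 2 = match),
--     then one sweep over the sorted terms classifying each."""
--     if not function_prediction or not top_match:
--         return None
--
--     flags = {}
--     for t in function_prediction.get("go_terms", []):
--         term = t.get("term", "")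
--         flags[term] = flags.get(term, 0) | 1
--     for t in top_match.get("go_terms", []):
--         term = t.get("term", "")
--         flags[term] = flags.get(term, 0) | 2
--
--     if not flags:
--         return None
--
--     query_only, shared, match_only = [], [], []
--     for term in sorted(flags):
--         f = flags[term]
--         if f == 1:
--             query_only.append(term)
--         elif f == 3:
--             shared.append(term)
--         else:
--             match_only.append(term)
--     return query_only, shared, match_only
-- ===== Notes on version B (the rewrite author's own statement) =====
-- stated objective: alternative
-- what changed: Replaces the three separate set-difference/intersection computations by one flag dict (bit 1 = seen among query terms, bit 2 = among match terms) and a single classifying sweep over the sorted terms.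
import Mathlib
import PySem

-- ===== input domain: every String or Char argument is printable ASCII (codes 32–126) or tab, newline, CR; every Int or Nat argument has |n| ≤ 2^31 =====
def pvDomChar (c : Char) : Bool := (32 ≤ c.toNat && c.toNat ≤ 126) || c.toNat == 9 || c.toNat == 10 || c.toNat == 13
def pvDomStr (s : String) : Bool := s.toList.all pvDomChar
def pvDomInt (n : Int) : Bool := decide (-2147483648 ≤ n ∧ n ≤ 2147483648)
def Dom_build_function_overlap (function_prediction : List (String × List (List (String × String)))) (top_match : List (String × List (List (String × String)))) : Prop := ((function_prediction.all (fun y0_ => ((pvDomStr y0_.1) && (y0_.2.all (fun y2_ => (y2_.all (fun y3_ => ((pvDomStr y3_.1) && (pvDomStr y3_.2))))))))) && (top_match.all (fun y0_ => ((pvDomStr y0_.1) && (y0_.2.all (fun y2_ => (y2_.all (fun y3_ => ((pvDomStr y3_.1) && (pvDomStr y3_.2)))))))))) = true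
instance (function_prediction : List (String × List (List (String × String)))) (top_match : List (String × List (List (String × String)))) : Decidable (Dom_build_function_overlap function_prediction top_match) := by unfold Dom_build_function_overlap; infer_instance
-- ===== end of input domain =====

-- B replaces A's three set-operation computations (intersection and two differences, each sorted) by a single
-- flag dict (bit 1 = seen among query terms, bit 2 = among match terms) and one classifying sweep over the
-- sorted terms; alternative decomposition, same asymptotic cost.

-- d.get("go_terms", [])  (shared helper: both Pythons write this lookup)
def pvGo (d : List (String × List (List (String × String)))) : List (List (String × String)) :=
  (PySem.Dict.mk d).getD "go_terms" []

-- t.get("term", "")  (shared helper: both Pythons write this lookup)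
def pvTerm (t : List (String × String)) : String :=
  (PySem.Dict.mk t).getD "term" ""

-- ===== PORT A =====
def build_function_overlap (function_prediction : List (String × List (List (String × String)))) (top_match : List (String × List (List (String × String)))) : Option (List String × List String × List String) :=
  if function_prediction = [] ∨ top_match = [] then none
  else
    let query_terms : PySem.Set String := PySem.Set.ofList ((pvGo function_prediction).map pvTerm)
    let match_terms : PySem.Set String := PySem.Set.ofList ((pvGo top_match).map pvTerm)
    if query_terms = [] ∧ match_terms = [] then none
    else
      let shared := PySem.List.sorted (PySem.Set.inter query_terms match_terms) (fun x => x)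
      let query_only := PySem.List.sorted (PySem.Set.diff query_terms match_terms) (fun x => x)
      let match_only := PySem.List.sorted (PySem.Set.diff match_terms query_terms) (fun x => x)
      if shared = [] ∧ query_only = [] ∧ match_only = [] then none
      else some (query_only, shared, match_only)
-- ===== PORT B =====
def build_function_overlap_alt (function_prediction : List (String × List (List (String × String)))) (top_match : List (String × List (List (String × String)))) : Option (List String × List String × List String) :=
  if function_prediction = [] ∨ top_match = [] then none
  else
    let flags1 : PySem.Dict String Int :=
      (pvGo function_prediction).foldl
        (fun d t => d.insert (pvTerm t) (PySem.Int.bor (d.getD (pvTerm t) 0) 1)) PySem.Dict.empty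
    let flags : PySem.Dict String Int :=
      (pvGo top_match).foldl
        (fun d t => d.insert (pvTerm t) (PySem.Int.bor (d.getD (pvTerm t) 0) 2)) flags1
    if flags.keys = [] then none
    else
      let out := (PySem.List.sorted flags.keys (fun x => x)).foldl
        (fun acc term =>
          let f := flags.getD term 0
          if f = 1 then (acc.1 ++ [term], acc.2.1, acc.2.2)
          else if f = 3 then (acc.1, acc.2.1 ++ [term], acc.2.2)
          else (acc.1, acc.2.1, acc.2.2 ++ [term]))
        ([], [], [])
      some out

-- ===== PRECONDITION & SPEC =====
def Spec_build_function_overlap (function_prediction : List (String × List (List (String × String)))) (top_match : List (String × List (List (String × String)))) (out : Option (List String × List String × List String)) : Prop := out = build_function_overlap_alt function_prediction top_match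
instance (function_prediction : List (String × List (List (String × String)))) (top_match : List (String × List (List (String × String)))) (out : Option (List String × List String × List String)) : Decidable (Spec_build_function_overlap function_prediction top_match out) := by unfold Spec_build_function_overlap; infer_instance

-- ===== CLAIM (what is proved, stated in full; the proofs are below) =====
def Claim_equal_build_function_overlap : Prop := ∀ (function_prediction : List (String × List (List (String × String)))) (top_match : List (String × List (List (String × String)))), Dom_build_function_overlap function_prediction top_match → Spec_build_function_overlap function_prediction top_match (build_function_overlap function_prediction top_match)

-- ===== LEMMAS AND PROOFS =====
theorem pvGetD_flags (l1 l2 : List (List (String × String))) (x : String) :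
    ((l2.foldl (fun d t => d.insert (pvTerm t) (PySem.Int.bor (d.getD (pvTerm t) 0) 2))
      (l1.foldl (fun d t => d.insert (pvTerm t) (PySem.Int.bor (d.getD (pvTerm t) 0) 1))
        PySem.Dict.empty)).getD x 0)
    = if x ∈ l2.map pvTerm then (if x ∈ l1.map pvTerm then 3 else 2)
      else (if x ∈ l1.map pvTerm then 1 else 0) := by
  induction l2 using List.reverseRecOn generalizing x with
  | nil =>
      simp only [List.foldl_nil, List.map_nil, List.not_mem_nil, if_false]
      induction l1 using List.reverseRecOn generalizing x with
      | nil => simp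
      | append_singleton l t ih =>
          simp only [List.foldl_append, List.foldl_cons, List.foldl_nil,
            PySem.Dict.getD_insert, List.map_append, List.mem_append,
            List.map_cons, List.map_nil, List.mem_cons, List.not_mem_nil, or_false]
          rw [ih, ih]
          by_cases hx : x = pvTerm t
          · subst hx
            split_ifs <;> first | rfl | decide | tauto
          · simp [hx]
  | append_singleton l t ih =>
      simp only [List.foldl_append, List.foldl_cons, List.foldl_nil,
        PySem.Dict.getD_insert, List.map_append, List.mem_append,
        List.map_cons, List.map_nil, List.mem_cons, List.not_mem_nil, or_false]
      rw [ih, ih]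
      by_cases hx : x = pvTerm t
      · subst hx
        split_ifs <;> first | rfl | decide | tauto
      · simp [hx]

theorem pvKeys_flags (l1 l2 : List (List (String × String))) :
    ((l2.foldl (fun d t => d.insert (pvTerm t) (PySem.Int.bor (d.getD (pvTerm t) 0) 2))
      (l1.foldl (fun d t => d.insert (pvTerm t) (PySem.Int.bor (d.getD (pvTerm t) 0) 1))
        PySem.Dict.empty)).keys)
    = PySem.Set.ofList (l1.map pvTerm ++ l2.map pvTerm) := by
  rw [PySem.Dict.keys_foldl_insert_key, PySem.Dict.keys_foldl_insert_key,
    PySem.Set.ofList_append]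
  simp [PySem.Dict.keys_empty, PySem.Set.update_nil_left]

theorem pvFoldl_classify (g : String → Int) (K : List String)
    (acc : List String × List String × List String) :
    (K.foldl (fun acc term =>
        if g term = 1 then (acc.1 ++ [term], acc.2.1, acc.2.2)
        else if g term = 3 then (acc.1, acc.2.1 ++ [term], acc.2.2)
        else (acc.1, acc.2.1, acc.2.2 ++ [term])) acc)
    = (acc.1 ++ K.filter (fun x => decide (g x = 1)),
       acc.2.1 ++ K.filter (fun x => decide (g x = 3)),
       acc.2.2 ++ K.filter (fun x => decide (¬ g x = 1 ∧ ¬ g x = 3))) := by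
  induction K generalizing acc with
  | nil => simp
  | cons t K ih =>
      simp only [List.foldl_cons, List.filter_cons, ih]
      by_cases h1 : g t = 1
      · simp [h1]
      · by_cases h3 : g t = 3 <;> simp [h1, h3]

theorem pvFilter1 (Q M : List String) (g : String → Int)
    (hg : ∀ x, g x = if x ∈ M then (if x ∈ Q then 3 else 2) else (if x ∈ Q then 1 else 0)) :
    ((PySem.List.sorted (PySem.Set.ofList (Q ++ M)) (fun x => x)).filter (fun x => decide (g x = 1)))
      = PySem.List.sorted (PySem.Set.diff (PySem.Set.ofList Q) (PySem.Set.ofList M)) (fun x => x) := by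
  symm
  apply PySem.List.sorted_eq_of_perm_of_pairwise_lt
  · rw [List.perm_ext_iff_of_nodup]
    · intro a
      simp only [List.mem_filter, PySem.List.mem_sorted, PySem.Set.mem_ofList,
        PySem.Set.mem_diff, List.mem_append, hg, decide_eq_true_eq]
      by_cases h1 : a ∈ Q <;> by_cases h2 : a ∈ M <;> simp [h1, h2]
    · exact ((PySem.List.sorted_perm _ _ _).nodup_iff.mpr (PySem.Set.nodup_ofList _)).filter _
    · exact PySem.Set.nodup_diff _ _ (PySem.Set.nodup_ofList _)
  · exact (PySem.List.sorted_ofList_pairwise_lt _).filter _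

theorem pvFilter3 (Q M : List String) (g : String → Int)
    (hg : ∀ x, g x = if x ∈ M then (if x ∈ Q then 3 else 2) else (if x ∈ Q then 1 else 0)) :
    ((PySem.List.sorted (PySem.Set.ofList (Q ++ M)) (fun x => x)).filter (fun x => decide (g x = 3)))
      = PySem.List.sorted (PySem.Set.inter (PySem.Set.ofList Q) (PySem.Set.ofList M)) (fun x => x) := by
  symm
  apply PySem.List.sorted_eq_of_perm_of_pairwise_lt
  · rw [List.perm_ext_iff_of_nodup]
    · intro a
      simp only [List.mem_filter, PySem.List.mem_sorted, PySem.Set.mem_ofList,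
        PySem.Set.mem_inter, List.mem_append, hg, decide_eq_true_eq]
      by_cases h1 : a ∈ Q <;> by_cases h2 : a ∈ M <;> simp [h1, h2]
    · exact ((PySem.List.sorted_perm _ _ _).nodup_iff.mpr (PySem.Set.nodup_ofList _)).filter _
    · exact PySem.Set.nodup_inter _ _ (PySem.Set.nodup_ofList _)
  · exact (PySem.List.sorted_ofList_pairwise_lt _).filter _

theorem pvFilterE (Q M : List String) (g : String → Int)
    (hg : ∀ x, g x = if x ∈ M then (if x ∈ Q then 3 else 2) else (if x ∈ Q then 1 else 0)) :
    ((PySem.List.sorted (PySem.Set.ofList (Q ++ M)) (fun x => x)).filter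
        (fun x => decide (¬ g x = 1 ∧ ¬ g x = 3)))
      = PySem.List.sorted (PySem.Set.diff (PySem.Set.ofList M) (PySem.Set.ofList Q)) (fun x => x) := by
  symm
  apply PySem.List.sorted_eq_of_perm_of_pairwise_lt
  · rw [List.perm_ext_iff_of_nodup]
    · intro a
      simp only [List.mem_filter, PySem.List.mem_sorted, PySem.Set.mem_ofList,
        PySem.Set.mem_diff, List.mem_append, hg, decide_eq_true_eq]
      by_cases h1 : a ∈ Q <;> by_cases h2 : a ∈ M <;> simp [h1, h2]
    · exact ((PySem.List.sorted_perm _ _ _).nodup_iff.mpr (PySem.Set.nodup_ofList _)).filter _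
    · exact PySem.Set.nodup_diff _ _ (PySem.Set.nodup_ofList _)
  · exact (PySem.List.sorted_ofList_pairwise_lt _).filter _

theorem pv_main (fp tm : List (String × List (List (String × String)))) :
    build_function_overlap fp tm = build_function_overlap_alt fp tm := by
  unfold build_function_overlap build_function_overlap_alt
  by_cases h0 : fp = [] ∨ tm = []
  · simp [h0]
  · simp only [h0, if_false]
    rw [pvKeys_flags, pvFoldl_classify]
    simp only [pvGetD_flags, List.nil_append]
    rw [pvFilter1 _ _ _ (fun x => rfl), pvFilter3 _ _ _ (fun x => rfl),
      pvFilterE _ _ _ (fun x => rfl)]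
    set Q := (pvGo fp).map pvTerm with hQ
    set M := (pvGo tm).map pvTerm with hM
    by_cases hemp : PySem.Set.ofList (Q ++ M) = []
    · have hnm : ∀ a : String, a ∉ Q ∧ a ∉ M := by
        intro a
        have h := List.eq_nil_iff_forall_not_mem.mp hemp a
        rw [PySem.Set.mem_ofList, List.mem_append] at h
        exact ⟨fun hq => h (Or.inl hq), fun hm => h (Or.inr hm)⟩
      have hq : PySem.Set.ofList Q = [] :=
        List.eq_nil_iff_forall_not_mem.mpr
          (fun a ha => (hnm a).1 ((PySem.Set.mem_ofList _ _).mp ha))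
      have hm : PySem.Set.ofList M = [] :=
        List.eq_nil_iff_forall_not_mem.mpr
          (fun a ha => (hnm a).2 ((PySem.Set.mem_ofList _ _).mp ha))
      simp [hemp, hq, hm]
    · have hne : ¬(PySem.Set.ofList Q = [] ∧ PySem.Set.ofList M = []) := by
        rintro ⟨h1, h2⟩
        apply hemp
        rw [List.eq_nil_iff_forall_not_mem] at h1 h2 ⊢
        intro a ha
        rw [PySem.Set.mem_ofList, List.mem_append] at ha
        rcases ha with h | h
        · exact h1 a ((PySem.Set.mem_ofList _ _).mpr h)
        · exact h2 a ((PySem.Set.mem_ofList _ _).mpr h)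
      have h3 : ¬((PySem.List.sorted (PySem.Set.inter (PySem.Set.ofList Q) (PySem.Set.ofList M)) (fun x => x)) = [] ∧
          (PySem.List.sorted (PySem.Set.diff (PySem.Set.ofList Q) (PySem.Set.ofList M)) (fun x => x)) = [] ∧
          (PySem.List.sorted (PySem.Set.diff (PySem.Set.ofList M) (PySem.Set.ofList Q)) (fun x => x)) = []) := by
        obtain ⟨a, ha⟩ := List.exists_mem_of_ne_nil _ hemp
        rw [PySem.Set.mem_ofList, List.mem_append] at ha
        rintro ⟨e3, e1, e2⟩
        rw [List.eq_nil_iff_forall_not_mem] at e3 e1 e2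
        by_cases h1 : a ∈ Q <;> by_cases h2 : a ∈ M
        · exact e3 a ((PySem.List.mem_sorted _ _ _ _).mpr ((PySem.Set.mem_inter _ _ _).mpr
            ⟨(PySem.Set.mem_ofList _ _).mpr h1, (PySem.Set.mem_ofList _ _).mpr h2⟩))
        · exact e1 a ((PySem.List.mem_sorted _ _ _ _).mpr ((PySem.Set.mem_diff _ _ _).mpr
            ⟨(PySem.Set.mem_ofList _ _).mpr h1, fun hc => h2 ((PySem.Set.mem_ofList _ _).mp hc)⟩))
        · exact e2 a ((PySem.List.mem_sorted _ _ _ _).mpr ((PySem.Set.mem_diff _ _ _).mpr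
            ⟨(PySem.Set.mem_ofList _ _).mpr h2, fun hc => h1 ((PySem.Set.mem_ofList _ _).mp hc)⟩))
        · tauto
      rw [if_neg hne, if_neg hemp, if_neg h3]

-- ===== VERDICT (by name: the statement is the Claim_ definition above) =====
theorem build_function_overlap_spec : Claim_equal_build_function_overlap := by
  intro fp tm _
  unfold Spec_build_function_overlap
  exact pv_main fp tm
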